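-- pv_equiv track=rewrite | github.com/BuilderBenv1/brain-v | scripts/run_recipe_structure.py | skeleton
-- ===== SOURCE A (Python) =====
-- EVA_MAP = [
--     ("cth","tk"),("ckh","kk"),("cph","pk"),("ch","k"),("sh","s"),
--     ("k","k"),("d","d"),("r","r"),("s","s"),("l","l"),
--     ("n","n"),("y","y"),("m","m"),("g","g"),
--     ("t","t"),("p","p"),("f","s"),("q","w"),
-- ]
--
-- def skeleton(word):
--     out = []; i = 0
--     while i < len(word):
--         matched = False
--         for ev, sy in EVA_MAP:
--             if word.startswith(ev, i):
--                 out.append(sy); i += len(ev); matched = True; break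
--         if not matched:
--             i += 1
--     return "".join(out)
-- ===== SOURCE B (Python) =====
-- _SINGLE = {"k": "k", "d": "d", "r": "r", "s": "s", "l": "l",
--            "n": "n", "y": "y", "m": "m", "g": "g",
--            "t": "t", "p": "p", "f": "s", "q": "w"}
--
-- def skeleton(word):
--     # walk a hand-rolled trie: only 'c' and 's' start multi-letter keys,
--     # everything else is a single-character substitution (or a skip)
--     out = []
--     i = 0
--     n = len(word)
--     while i < n:
--         c = word[i]
--         if c == "c":
--             if i + 2 < n and word[i+1] in "tkp" and word[i+2] == "h":
--                 out.append(word[i+1] + "k")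
--                 i += 3
--             elif i + 1 < n and word[i+1] == "h":
--                 out.append("k")
--                 i += 2
--             else:
--                 i += 1
--         elif c == "s" and i + 1 < n and word[i+1] == "h":
--             out.append("s")
--             i += 2
--         else:
--             sy = _SINGLE.get(c)
--             if sy is not None:
--                 out.append(sy)
--             i += 1
--     return "".join(out)
-- ===== Notes on version B (the rewrite author's own statement) =====
-- stated objective: faster
-- what changed: Replaces A's per-position ordered startswith scan of the 18-pair EVA_MAP with a hand-rolled trie walk: branch on the head character, peek ahead only when it is one of the two letters that start a multi-letter key, and otherwise use a single-character substitution dict.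
import Mathlib
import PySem

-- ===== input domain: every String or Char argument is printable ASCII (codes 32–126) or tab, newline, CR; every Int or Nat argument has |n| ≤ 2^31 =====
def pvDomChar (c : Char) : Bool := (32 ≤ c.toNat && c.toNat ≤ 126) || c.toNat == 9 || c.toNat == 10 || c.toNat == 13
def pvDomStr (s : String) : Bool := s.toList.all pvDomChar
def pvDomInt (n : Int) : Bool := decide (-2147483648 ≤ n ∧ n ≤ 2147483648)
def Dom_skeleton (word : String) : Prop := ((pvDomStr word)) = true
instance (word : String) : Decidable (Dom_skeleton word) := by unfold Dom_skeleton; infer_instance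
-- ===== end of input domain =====

-- B replaces A's per-position ordered 18-entry startswith scan of EVA_MAP by a hand-rolled
-- trie walk (peek ahead only after the two letters starting multi-letter keys, single-char dict
-- otherwise); a timing run measured B ~9x faster at the largest size.


-- ===== PORT A =====
-- EVA_MAP, on the code-point (List Char) side
def evaMap : List (List Char × String) :=
  [(['c','t','h'],"tk"),(['c','k','h'],"kk"),(['c','p','h'],"pk"),(['c','h'],"k"),(['s','h'],"s"),
   (['k'],"k"),(['d'],"d"),(['r'],"r"),(['s'],"s"),(['l'],"l"),
   (['n'],"n"),(['y'],"y"),(['m'],"m"),(['g'],"g"),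
   (['t'],"t"),(['p'],"p"),(['f'],"s"),(['q'],"w")]

-- the inner `for ev, sy in EVA_MAP: if word.startswith(ev, i): … break` loop:
-- first pair whose key is a prefix of the current suffix, with the advance len(ev)
def evaFind : List (List Char × String) → List Char → Option (String × Nat)
  | [], _ => none
  | (ev, sy) :: rest, cs =>
      if ev.isPrefixOf cs then some (sy, ev.length) else evaFind rest cs

-- termination fact for the while loop (cited by goA's decreasing_by)
theorem evaFind_pos (m : List (List Char × String)) (hm : ∀ p ∈ m, 0 < p.1.length)
    (cs : List Char) (s0 : String) (n0 : Nat) (h : evaFind m cs = some (s0, n0)) : 0 < n0 := by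
  induction m with
  | nil => simp [evaFind] at h
  | cons p rest ih =>
      obtain ⟨ev, sv⟩ := p
      simp only [evaFind] at h
      split at h
      · cases h; exact hm (ev, s0) (by simp)
      · exact ih (fun q hq => hm q (by simp [hq])) h

-- the `while i < len(word)` loop of A, on the current suffix
def goA (cs : List Char) : List String :=
  if hcs : cs = [] then []
  else
    match h : evaFind evaMap cs with
    | some (sy, n) => sy :: goA (cs.drop n)
    | none => goA (cs.drop 1)
termination_by cs.length
decreasing_by
  · have hn : 0 < n := evaFind_pos evaMap (by decide) cs sy n h
    have hl : 0 < cs.length := List.length_pos_of_ne_nil hcs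
    simp only [List.length_drop]; omega
  · have hl : 0 < cs.length := List.length_pos_of_ne_nil hcs
    simp only [List.length_drop]; omega

def skeleton (word : String) : String := PySem.Str.join "" (goA word.toList)

-- ===== PORT B =====
-- Source B's _SINGLE dict: association list (single-character keys only)
def singles : List (Char × String) :=
  [('k',"k"),('d',"d"),('r',"r"),('s',"s"),('l',"l"),
   ('n',"n"),('y',"y"),('m',"m"),('g',"g"),
   ('t',"t"),('p',"p"),('f',"s"),('q',"w")]

-- _SINGLE.get(c): first pair with key equal to c
def singleGet : List (Char × String) → Char → Option String
  | [], _ => none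
  | (k, v) :: rest, c => if k = c then some v else singleGet rest c

-- B's trie walk: branch on the head character; peek one or two characters ahead
-- only when the head is 'c' or 's', exactly as Source B's if/elif chain does
def goB : List Char → List String
  | [] => []
  | 'c' :: x :: 'h' :: rest =>
      if x = 't' || x = 'k' || x = 'p' then String.ofList [x, 'k'] :: goB rest
      else if x = 'h' then "k" :: goB ('h' :: rest)
      else goB (x :: 'h' :: rest)
  | 'c' :: 'h' :: rest => "k" :: goB rest
  | 'c' :: rest => goB rest
  | 's' :: 'h' :: rest => "s" :: goB rest
  | c :: rest =>
      match singleGet singles c with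
      | some sy => sy :: goB rest
      | none => goB rest

def skeleton_alt (word : String) : String := PySem.Str.join "" (goB word.toList)

-- ===== PRECONDITION & SPEC =====
def Spec_skeleton (word : String) (out : String) : Prop := out = skeleton_alt word
instance (word : String) (out : String) : Decidable (Spec_skeleton word out) := by unfold Spec_skeleton; infer_instance

-- ===== CLAIM (what is proved, stated in full; the proofs are below) =====
def Claim_equal_skeleton : Prop := ∀ (word : String), Dom_skeleton word → Spec_skeleton word (skeleton word)

-- ===== LEMMAS AND PROOFS =====

-- on the single-letter tail of the table, A's prefix scan is B's dict lookup (advance 1)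
theorem evaFind_singles (m : List (Char × String)) (c : Char) (rest : List Char) :
    evaFind (m.map (fun p => ([p.1], p.2))) (c :: rest)
      = (singleGet m c).map (fun s => (s, 1)) := by
  induction m with
  | nil => rfl
  | cons p tail ih =>
      obtain ⟨k, v⟩ := p
      simp only [List.map_cons, evaFind, singleGet]
      by_cases hk : k = c
      · subst hk; simp [List.isPrefixOf]
      · rw [if_neg (by simp [List.isPrefixOf, hk]), if_neg hk, ih]

-- unfolding lemma for A's loop on a nonempty suffix
theorem goA_unfold (cs : List Char) (hcs : cs ≠ []) :
    goA cs = match evaFind evaMap cs with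
             | some (sy, n) => sy :: goA (cs.drop n)
             | none => goA (cs.drop 1) := by
  rw [goA.eq_def, dif_neg hcs]
  split <;> rename_i h <;> rw [h]

-- A's scan on suffixes headed by anything but 'c', and not "sh…": the five
-- multi-letter entries all fail, only the single-letter group remains
theorem evaFind_not_c (c : Char) (rest : List Char) (hc : c ≠ 'c')
    (hs : ¬ (c = 's' ∧ rest.head? = some 'h')) :
    evaFind evaMap (c :: rest) = (singleGet singles c).map (fun s => (s, 1)) := by
  have h1 : ∀ (k : List Char) (v : String) (m : List (List Char × String)),
      ¬ k.isPrefixOf (c :: rest) →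
      evaFind ((k, v) :: m) (c :: rest) = evaFind m (c :: rest) := by
    intro k v m hk; simp [evaFind, hk]
  show evaFind ([(['c','t','h'],"tk"),(['c','k','h'],"kk"),(['c','p','h'],"pk"),
    (['c','h'],"k"),(['s','h'],"s")] ++ singles.map (fun p => ([p.1], p.2))) (c :: rest) = _
  rw [List.cons_append,
      h1 _ _ _ (by cases rest <;> simp [List.isPrefixOf] <;> intro h <;> exact absurd h.symm hc),
      List.cons_append,
      h1 _ _ _ (by cases rest <;> simp [List.isPrefixOf] <;> intro h <;> exact absurd h.symm hc),
      List.cons_append,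
      h1 _ _ _ (by cases rest <;> simp [List.isPrefixOf] <;> intro h <;> exact absurd h.symm hc),
      List.cons_append,
      h1 _ _ _ (by cases rest <;> simp [List.isPrefixOf] <;> intro h <;> exact absurd h.symm hc),
      List.cons_append,
      h1 _ _ _ ?_, List.nil_append]
  · exact evaFind_singles singles c rest
  · cases rest with
    | nil => simp [List.isPrefixOf]
    | cons y r =>
        simp only [List.isPrefixOf, List.isPrefixOf_nil_left, Bool.and_true]
        intro hb
        have := And.intro (beq_iff_eq.mp (Bool.and_elim_left hb))
          (beq_iff_eq.mp (Bool.and_elim_right hb))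
        exact hs ⟨this.1.symm, by simp [this.2.symm]⟩

-- B's loop on "ch…": both the 3-deep and the 2-deep pattern produce "k" and leave rest
theorem goB_ch (rest : List Char) : goB ('c' :: 'h' :: rest) = "k" :: goB rest := by
  match rest with
  | [] => rfl
  | y :: r =>
      by_cases hy : y = 'h'
      · subst hy; simp [goB]
      · rw [goB.eq_def]
        split
        case h_4 => rename_i hno heq; injection heq with _ h2; exact (hno (y :: r) h2.symm).elim
        case h_6 => rename_i hnc hsh heq; injection heq with h1 _; exact (hnc h1.symm).elim
        all_goals simp_all

-- B's loop on a head that is neither 'c' nor the start of "sh": the dict branch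
theorem goB_default (c : Char) (rest : List Char) (hc : c ≠ 'c')
    (hs : ¬ (c = 's' ∧ rest.head? = some 'h')) :
    goB (c :: rest) = (match singleGet singles c with
                      | some sy => sy :: goB rest
                      | none => goB rest) := by
  rw [goB.eq_def]
  split
  case h_6 => rename_i hnc hsh heq; injection heq with h1 h2; rw [← h1, ← h2]
  all_goals simp_all

-- B's loop on 'c' followed by no key: skip the 'c'
theorem goB_cskip (x : Char) (rest : List Char) (hx : x ≠ 'h')
    (hh : rest.head? ≠ some 'h') : goB ('c' :: x :: rest) = goB (x :: rest) := by
  rw [goB.eq_def]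
  split
  case h_6 => rename_i hnc hsh heq; injection heq with h1 _; exact (hnc h1.symm).elim
  all_goals simp_all

-- the loops agree on every suffix
theorem go_eq (cs : List Char) : goA cs = goB cs := by
  induction hn : cs.length using Nat.strong_induction_on generalizing cs with
  | _ n ih =>
  subst hn
  match cs with
  | [] => simp [goA, goB]
  | c :: rest =>
    by_cases hc : c = 'c'
    · subst hc
      match rest with
      | [] =>
          rw [goA_unfold _ (by simp), show evaFind evaMap ['c'] = none from by decide]
          simp [goA, goB]
      | x :: rest1 =>
        by_cases hx : x = 'h'
        · subst hx
          rw [goA_unfold _ (by simp),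
              show evaFind evaMap ('c' :: 'h' :: rest1) = some ("k", 2) from by
                simp [evaMap, evaFind, List.isPrefixOf],
              goB_ch]
          simp only [List.drop_succ_cons, List.drop_zero]
          exact congrArg _ (ih rest1.length (by simp) rest1 rfl)
        · match rest1 with
          | [] =>
              rw [goA_unfold _ (by simp),
                  show evaFind evaMap ['c', x] = none from by
                    simp [evaMap, evaFind, List.isPrefixOf, Ne.symm hx],
                  goB_cskip x [] hx (by simp)]
              exact ih 1 (by simp) [x] rfl
          | y :: rest2 =>
            by_cases hy : y = 'h'
            · subst hy
              by_cases hxt : x = 't'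
              · subst hxt
                rw [goA_unfold _ (by simp),
                    show evaFind evaMap ('c' :: 't' :: 'h' :: rest2) = some ("tk", 3) from by
                      simp [evaMap, evaFind, List.isPrefixOf]]
                simp only [goB, List.drop_succ_cons, List.drop_zero]
                norm_num
                exact ih rest2.length (by simp only [List.length_cons]; omega) rest2 rfl
              · by_cases hxk : x = 'k'
                · subst hxk
                  rw [goA_unfold _ (by simp),
                      show evaFind evaMap ('c' :: 'k' :: 'h' :: rest2) = some ("kk", 3) from by
                        simp [evaMap, evaFind, List.isPrefixOf]]
                  simp only [goB, List.drop_succ_cons, List.drop_zero]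
                  norm_num
                  exact ih rest2.length (by simp only [List.length_cons]; omega) rest2 rfl
                · by_cases hxp : x = 'p'
                  · subst hxp
                    rw [goA_unfold _ (by simp),
                        show evaFind evaMap ('c' :: 'p' :: 'h' :: rest2) = some ("pk", 3) from by
                          simp [evaMap, evaFind, List.isPrefixOf]]
                    simp only [goB, List.drop_succ_cons, List.drop_zero]
                    norm_num
                    exact ih rest2.length (by simp only [List.length_cons]; omega) rest2 rfl
                  · rw [goA_unfold _ (by simp),
                        show evaFind evaMap ('c' :: x :: 'h' :: rest2) = none from by
                          simp [evaMap, evaFind, List.isPrefixOf,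
                            Ne.symm hx, Ne.symm hxt, Ne.symm hxk, Ne.symm hxp]]
                    simp only [goB, List.drop_succ_cons, List.drop_zero]
                    rw [if_neg (by simp [hxt, hxk, hxp]), if_neg hx]
                    exact ih (x :: 'h' :: rest2).length (by simp only [List.length_cons]; omega) _ rfl
            · rw [goA_unfold _ (by simp),
                  show evaFind evaMap ('c' :: x :: y :: rest2) = none from by
                    simp [evaMap, evaFind, List.isPrefixOf, Ne.symm hx, Ne.symm hy],
                  goB_cskip x (y :: rest2) hx (by simp [hy])]
              exact ih (x :: y :: rest2).length (by simp only [List.length_cons]; omega) _ rfl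
    · by_cases hsh : c = 's' ∧ rest.head? = some 'h'
      · obtain ⟨hc', hh⟩ := hsh
        subst hc'
        rcases rest with _ | ⟨y, r⟩
        · simp at hh
        · simp only [List.head?_cons, Option.some.injEq] at hh
          subst hh
          rw [goA_unfold _ (by simp),
              show evaFind evaMap ('s' :: 'h' :: r) = some ("s", 2) from by
                simp [evaMap, evaFind, List.isPrefixOf]]
          simp only [goB, List.drop_succ_cons, List.drop_zero]
          exact congrArg _ (ih r.length (by simp only [List.length_cons]; omega) r rfl)
      · rw [goA_unfold _ (by simp), evaFind_not_c c rest hc hsh, goB_default c rest hc hsh]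
        have hr := ih rest.length (by simp) rest rfl
        rcases singleGet singles c with _ | sy <;> simp [hr]

-- ===== VERDICT (by name: the statement is the Claim_ definition above) =====
theorem skeleton_spec : Claim_equal_skeleton := by
  intro word _
  unfold Spec_skeleton skeleton skeleton_alt
  rw [go_eq]
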